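-- pv_equiv track=rewrite | github.com/mrbestnaija/portofolio_maximizer | scripts/run_live_denominator_overnight.py | _latest_trade_day_rows
-- ===== SOURCE A (Python) =====
-- from typing import Any
--
-- def _latest_trade_day_rows(summary: dict[str, Any]) -> tuple[str | None, list[dict[str, Any]]]:
--     latest_day: str | None = None
--     latest_rows: list[dict[str, Any]] = []
--     for row in summary.get("dataset_windows", []):
--         if str(row.get("context_type") or "").strip().upper() != "TRADE":
--             continue
--         file_name = str(row.get("file") or "")
--         if not file_name.startswith("forecast_audit_") or len(file_name) < 23:
--             continue
--         day = file_name[len("forecast_audit_") : len("forecast_audit_") + 8]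
--         if not day.isdigit():
--             continue
--         if latest_day is None or day > latest_day:
--             latest_day = day
--             latest_rows = [row]
--         elif day == latest_day:
--             latest_rows.append(row)
--     return latest_day, latest_rows
-- ===== SOURCE B (Python) =====
-- from typing import Any
--
--
-- def _trade_day_of(row: dict[str, Any]) -> str | None:
--     """Return the 8-digit day of a qualifying TRADE audit row, else None."""
--     if str(row.get("context_type") or "").strip().upper() != "TRADE":
--         return None
--     file_name = str(row.get("file") or "")
--     if not file_name.startswith("forecast_audit_") or len(file_name) < 23:
--         return None
--     day = file_name[15:23]
--     return day if day.isdigit() else None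
--
--
-- def _latest_trade_day_rows(summary: dict[str, Any]) -> tuple[str | None, list[dict[str, Any]]]:
--     pairs = [(d, row)
--              for row in summary.get("dataset_windows", [])
--              for d in [_trade_day_of(row)]
--              if d is not None]
--     if not pairs:
--         return None, []
--     latest = max(d for d, _ in pairs)
--     return latest, [row for d, row in pairs if d == latest]
-- ===== Notes on version B (the rewrite author's own statement) =====
-- stated objective: simpler
-- what changed: Replaces the single-pass running-max state machine (which resets/extends latest_rows while looping) by a stateless two-phase decomposition: build the list of (day, row) qualifying pairs once, then take max of the days and filter the pairs for that day.
import Mathlib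
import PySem

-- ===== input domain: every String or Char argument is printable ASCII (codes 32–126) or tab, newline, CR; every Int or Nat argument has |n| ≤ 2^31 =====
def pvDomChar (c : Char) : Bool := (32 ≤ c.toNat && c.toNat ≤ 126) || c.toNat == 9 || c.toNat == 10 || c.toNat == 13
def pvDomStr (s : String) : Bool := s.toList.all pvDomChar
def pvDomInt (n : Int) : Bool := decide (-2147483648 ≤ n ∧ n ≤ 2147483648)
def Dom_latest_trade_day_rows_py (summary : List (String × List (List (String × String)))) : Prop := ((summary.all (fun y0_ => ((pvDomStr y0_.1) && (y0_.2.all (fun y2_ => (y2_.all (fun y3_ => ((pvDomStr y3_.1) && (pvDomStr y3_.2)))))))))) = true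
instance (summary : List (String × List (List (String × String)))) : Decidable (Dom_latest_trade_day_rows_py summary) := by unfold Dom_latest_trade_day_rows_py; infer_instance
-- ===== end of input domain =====

-- B replaces A's single-pass running-max state machine by a stateless two-phase
-- decomposition (collect qualifying (day, row) pairs, then max + filter); objective: simpler.

-- ===== PORT A =====
def latest_trade_day_rows_py (summary : List (String × List (List (String × String)))) : Option String × (List (List (String × String))) :=
  (PySem.Dict.getD (PySem.Dict.mk summary) "dataset_windows" []).foldl
    (fun (st : Option String × List (List (String × String))) row =>
      if PySem.Str.upper (PySem.Str.strip (PySem.Dict.getD (PySem.Dict.mk row) "context_type" "")) ≠ "TRADE" then st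
      else
        let file_name := PySem.Dict.getD (PySem.Dict.mk row) "file" ""
        if ¬ PySem.Str.startswith file_name "forecast_audit_" ∨ PySem.Str.len file_name < 23 then st
        else
          let day := PySem.Str.slice file_name (some 15) (some 23)
          if ¬ PySem.Str.strIsdigit day then st
          else
            match st.1 with
            | none => (some day, [row])
            | some latest_day =>
              if latest_day < day then (some day, [row])
              else if day = latest_day then (st.1, st.2 ++ [row])
              else st)
    (none, [])

-- ===== PORT B =====
def pvTradeDayOf (row : List (String × String)) : Option String :=
  if PySem.Str.upper (PySem.Str.strip (PySem.Dict.getD (PySem.Dict.mk row) "context_type" "")) ≠ "TRADE" then none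
  else
    let file_name := PySem.Dict.getD (PySem.Dict.mk row) "file" ""
    if ¬ PySem.Str.startswith file_name "forecast_audit_" ∨ PySem.Str.len file_name < 23 then none
    else
      let day := PySem.Str.slice file_name (some 15) (some 23)
      if PySem.Str.strIsdigit day then some day else none

def latest_trade_day_rows_py_alt (summary : List (String × List (List (String × String)))) : Option String × (List (List (String × String))) :=
  let pairs := (PySem.Dict.getD (PySem.Dict.mk summary) "dataset_windows" []).filterMap
    (fun row => (pvTradeDayOf row).map (fun d => (d, row)))
  match PySem.List.max? (pairs.map Prod.fst) (fun d => d) with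
  | none => (none, [])
  | some latest => (some latest, (pairs.filter (fun p => p.1 == latest)).map Prod.snd)

-- ===== PRECONDITION & SPEC =====
def Spec_latest_trade_day_rows_py (summary : List (String × List (List (String × String)))) (out : Option String × (List (List (String × String)))) : Prop := out = latest_trade_day_rows_py_alt summary
instance (summary : List (String × List (List (String × String)))) (out : Option String × (List (List (String × String)))) : Decidable (Spec_latest_trade_day_rows_py summary out) := by unfold Spec_latest_trade_day_rows_py; infer_instance

-- ===== CLAIM (what is proved, stated in full; the proofs are below) =====
def Claim_equal_latest_trade_day_rows_py : Prop := ∀ (summary : List (String × List (List (String × String)))), Dom_latest_trade_day_rows_py summary → Spec_latest_trade_day_rows_py summary (latest_trade_day_rows_py summary)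

-- ===== LEMMAS AND PROOFS =====

-- A's loop body, seen as acting on the stream of qualifying (day, row) pairs.
def pvPairStep (st : Option String × List (List (String × String))) (p : String × List (String × String)) : Option String × List (List (String × String)) :=
  match st.1 with
  | none => (some p.1, [p.2])
  | some latest_day =>
    if latest_day < p.1 then (some p.1, [p.2])
    else if p.1 = latest_day then (st.1, st.2 ++ [p.2])
    else st

lemma pv_foldA_eq_foldP (ws : List (List (String × String))) (st : Option String × List (List (String × String))) :
    ws.foldl
      (fun (st : Option String × List (List (String × String))) row =>
        if PySem.Str.upper (PySem.Str.strip (PySem.Dict.getD (PySem.Dict.mk row) "context_type" "")) ≠ "TRADE" then st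
        else
          let file_name := PySem.Dict.getD (PySem.Dict.mk row) "file" ""
          if ¬ PySem.Str.startswith file_name "forecast_audit_" ∨ PySem.Str.len file_name < 23 then st
          else
            let day := PySem.Str.slice file_name (some 15) (some 23)
            if ¬ PySem.Str.strIsdigit day then st
            else
              match st.1 with
              | none => (some day, [row])
              | some latest_day =>
                if latest_day < day then (some day, [row])
                else if day = latest_day then (st.1, st.2 ++ [row])
                else st) st
    = (ws.filterMap (fun row => (pvTradeDayOf row).map (fun d => (d, row)))).foldl pvPairStep st := by
  induction ws generalizing st with
  | nil => rfl
  | cons r t ih =>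
    simp only [List.foldl_cons, List.filterMap_cons]
    by_cases h1 : PySem.Str.upper (PySem.Str.strip (PySem.Dict.getD (PySem.Dict.mk r) "context_type" "")) ≠ "TRADE"
    · simp only [pvTradeDayOf, if_pos h1, Option.map_none, ih]
    · by_cases h2 : ¬ PySem.Str.startswith (PySem.Dict.getD (PySem.Dict.mk r) "file" "") "forecast_audit_" ∨ PySem.Str.len (PySem.Dict.getD (PySem.Dict.mk r) "file" "") < 23
      · simp only [pvTradeDayOf, if_neg h1, if_pos h2, Option.map_none, ih]
      · by_cases h3 : PySem.Str.strIsdigit (PySem.Str.slice (PySem.Dict.getD (PySem.Dict.mk r) "file" "") (some 15) (some 23)) = true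
        · simp only [pvTradeDayOf, if_neg h1, if_neg h2, if_pos h3, Option.map_some, List.foldl_cons]
          rw [if_neg (not_not_intro h3)]
          exact ih _
        · simp only [pvTradeDayOf, if_neg h1, if_neg h2, if_neg h3, Option.map_none]
          rw [if_pos h3]
          exact ih _

-- the spec shape B computes, as a function of the pair stream
def pvSpecOf (ps : List (String × List (String × String))) : Option String × List (List (String × String)) :=
  match PySem.List.max? (ps.map Prod.fst) (fun d => d) with
  | none => (none, [])
  | some latest => (some latest, (ps.filter (fun p => p.1 == latest)).map Prod.snd)

lemma pv_foldP_spec (ps : List (String × List (String × String))) :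
    ps.foldl pvPairStep (none, []) = pvSpecOf ps := by
  induction ps using List.reverseRecOn with
  | nil => rfl
  | append_singleton ps p ih =>
    rcases p with ⟨d, r⟩
    rw [List.foldl_append, ih]
    simp only [List.foldl_cons, List.foldl_nil]
    rcases hm : PySem.List.max? (ps.map Prod.fst) (fun d => d) with _ | L
    · rw [PySem.List.max?_eq_none_iff] at hm
      have hps : ps = [] := List.map_eq_nil_iff.mp hm
      subst hps
      have h1 : PySem.List.max? [d] (fun d => d) = some d := by
        simpa using PySem.List.max?_id_cons d []
      simp [pvSpecOf, pvPairStep, h1, (PySem.List.max?_eq_none_iff ([] : List String) (fun d => d)).mpr rfl]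
    · rcases hcons : ps.map Prod.fst with _ | ⟨x, t'⟩
      · have h0 : PySem.List.max? ([] : List String) (fun d => d) = none :=
          (PySem.List.max?_eq_none_iff _ _).mpr rfl
        rw [hcons, h0] at hm
        simp at hm
      · have hLf : L = t'.foldl max x := by
          have hc := PySem.List.max?_id_cons x t'
          rw [hcons, hc] at hm
          exact (Option.some_inj.mp hm).symm
        have hmax2 : PySem.List.max? ((ps ++ [(d, r)]).map Prod.fst) (fun d => d) = some (max L d) := by
          have hc := PySem.List.max?_id_cons x (t' ++ [d])
          rw [List.map_append, hcons]
          simpa [List.foldl_append, hLf] using hc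
        have hbound : ∀ y ∈ ps.map Prod.fst, y ≤ L := fun y hy => by
          simpa using PySem.List.max?_isMax hm y hy
        simp only [pvSpecOf, hm, hmax2]
        simp only [pvPairStep]
        by_cases hlt : L < d
        · rw [if_pos hlt, max_eq_right hlt.le]
          have hnil : List.filter (fun p => p.1 == d) ps = [] := by
            rw [List.filter_eq_nil_iff]
            intro p hp
            have hb := hbound p.1 (List.mem_map.mpr ⟨p, hp, rfl⟩)
            simp only [beq_iff_eq]
            intro he
            rw [he] at hb
            exact absurd hlt (not_lt.mpr hb)
          rw [List.filter_append, hnil]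
          simp
        · rw [if_neg hlt, max_eq_left (not_lt.mp hlt)]
          by_cases heq : d = L
          · rw [if_pos heq, List.filter_append]
            simp [heq]
          · rw [if_neg heq, List.filter_append]
            simp [heq]

-- ===== VERDICT (by name: the statement is the Claim_ definition above) =====
theorem latest_trade_day_rows_py_spec : Claim_equal_latest_trade_day_rows_py := by
  intro summary _
  unfold Spec_latest_trade_day_rows_py latest_trade_day_rows_py latest_trade_day_rows_py_alt
  rw [pv_foldA_eq_foldP, pv_foldP_spec]
  rfl
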